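-- pv_equiv track=rewrite | github.com/daeun084/BaekJoon | 백준/Gold/5639. 이진 검색 트리/이진 검색 트리.py | find_post_order
-- ===== SOURCE A (Python) =====
-- def find_post_order(pre_order):
--     if not pre_order:
--         return []
--
--     root = pre_order[0]
--     left_subtree = [x for x in pre_order if x < root]
--     right_subtree = [x for x in pre_order if x > root]
--
--     left_post_order = find_post_order(left_subtree)
--     right_post_order = find_post_order(right_subtree)
--
--     return left_post_order + right_post_order + [root]
-- ===== SOURCE B (Python) =====
-- def find_post_order(pre_order):
--     # Build the BST by inserting each value in order (duplicates ignored),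
--     # then emit a postorder traversal of the built tree.
--     def insert(t, v):
--         if t is None:
--             return (v, None, None)
--         val, l, r = t
--         if v < val:
--             return (val, insert(l, v), r)
--         if v > val:
--             return (val, l, insert(r, v))
--         return t
--
--     t = None
--     for v in pre_order:
--         t = insert(t, v)
--
--     def post(t):
--         if t is None:
--             return []
--         val, l, r = t
--         return post(l) + post(r) + [val]
--
--     return post(t)
-- ===== Notes on version B (the rewrite author's own statement) =====
-- stated objective: alternative
-- what changed: A re-filters the whole list at every recursion level; B instead builds an explicit BST once by inserting the values one at a time and then emits a single postorder traversal of that tree.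
import Mathlib
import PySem

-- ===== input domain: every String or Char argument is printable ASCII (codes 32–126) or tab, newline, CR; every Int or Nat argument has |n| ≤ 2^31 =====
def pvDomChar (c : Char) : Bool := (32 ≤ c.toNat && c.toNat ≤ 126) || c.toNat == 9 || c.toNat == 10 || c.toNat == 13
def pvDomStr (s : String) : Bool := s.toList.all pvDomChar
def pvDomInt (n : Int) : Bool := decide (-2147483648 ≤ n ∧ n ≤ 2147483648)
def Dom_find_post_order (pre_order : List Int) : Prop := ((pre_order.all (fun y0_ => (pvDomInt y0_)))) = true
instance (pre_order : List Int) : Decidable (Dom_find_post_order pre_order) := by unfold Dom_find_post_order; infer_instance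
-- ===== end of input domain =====

-- B builds an explicit BST by repeated insertion and postorder-traverses it once,
-- instead of A's per-level re-filtering of the list (alternative algorithm, same worst-case cost).


-- ===== PORT A =====
def find_post_order (pre_order : List Int) : List Int :=
  match pre_order with
  | [] => []
  | root :: rest =>
    let left_subtree := (root :: rest).filter (fun x => x < root)
    let right_subtree := (root :: rest).filter (fun x => root < x)
    find_post_order left_subtree ++ find_post_order right_subtree ++ [root]
termination_by pre_order.length
decreasing_by
  · simp only [List.filter_cons, lt_irrefl, if_false, List.length_cons,
      decide_false, Bool.false_eq_true]
    exact Nat.lt_succ_of_le (List.length_filter_le _ _)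
  · simp only [List.filter_cons, lt_irrefl, if_false, List.length_cons,
      decide_false, Bool.false_eq_true]
    exact Nat.lt_succ_of_le (List.length_filter_le _ _)

-- ===== PORT B =====
inductive PVTree where
  | leaf : PVTree
  | node : Int → PVTree → PVTree → PVTree
deriving DecidableEq, Repr

-- B's `insert` helper: BST insertion, duplicates ignored
def pvInsert : PVTree → Int → PVTree
  | .leaf, v => .node v .leaf .leaf
  | .node w l r, v =>
    if v < w then .node w (pvInsert l v) r
    else if w < v then .node w l (pvInsert r v)
    else .node w l r

-- B's `post` helper: postorder traversal
def pvPost : PVTree → List Int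
  | .leaf => []
  | .node w l r => pvPost l ++ pvPost r ++ [w]

def find_post_order_alt (pre_order : List Int) : List Int :=
  pvPost (pre_order.foldl pvInsert .leaf)

-- ===== PRECONDITION & SPEC =====
def Spec_find_post_order (pre_order : List Int) (out : List Int) : Prop := out = find_post_order_alt pre_order
instance (pre_order : List Int) (out : List Int) : Decidable (Spec_find_post_order pre_order out) := by unfold Spec_find_post_order; infer_instance

-- ===== CLAIM (what is proved, stated in full; the proofs are below) =====
def Claim_equal_find_post_order : Prop := ∀ (pre_order : List Int), Dom_find_post_order pre_order → Spec_find_post_order pre_order (find_post_order pre_order)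

-- ===== LEMMAS AND PROOFS =====

-- Folding insertions into a node splits into the two subtrees by the filter on the root.
theorem foldl_pvInsert_node (xs : List Int) (v : Int) (l r : PVTree) :
    xs.foldl pvInsert (.node v l r) =
      .node v ((xs.filter (fun x => x < v)).foldl pvInsert l)
              ((xs.filter (fun x => v < x)).foldl pvInsert r) := by
  induction xs generalizing l r with
  | nil => simp
  | cons x xs ih =>
    by_cases h1 : x < v
    · have h2 : ¬ v < x := by omega
      simp [List.foldl, h1, h2, pvInsert, ih]
    · by_cases h2 : v < x
      · simp [List.foldl, h1, h2, pvInsert, ih]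
      · simp [List.foldl, h1, h2, pvInsert, ih]

theorem find_post_order_eq_alt (xs : List Int) :
    find_post_order xs = find_post_order_alt xs := by
  induction hn : xs.length using Nat.strong_induction_on generalizing xs with
  | _ n ih =>
    match xs with
    | [] => simp [find_post_order, find_post_order_alt, pvPost]
    | root :: rest =>
      have hfl : (root :: rest).filter (fun x => x < root) = rest.filter (fun x => x < root) := by
        simp
      have hfr : (root :: rest).filter (fun x => root < x) = rest.filter (fun x => root < x) := by
        simp
      have hl : (rest.filter (fun x => x < root)).length < n := by
        subst hn
        exact Nat.lt_succ_of_le (List.length_filter_le _ _)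
      have hr : (rest.filter (fun x => root < x)).length < n := by
        subst hn
        exact Nat.lt_succ_of_le (List.length_filter_le _ _)
      rw [find_post_order, hfl, hfr,
        ih _ hl _ rfl, ih _ hr _ rfl]
      show _ = pvPost ((root :: rest).foldl pvInsert .leaf)
      rw [List.foldl_cons]
      show _ = pvPost (rest.foldl pvInsert (.node root .leaf .leaf))
      rw [foldl_pvInsert_node]
      simp [pvPost, find_post_order_alt]

-- ===== VERDICT (by name: the statement is the Claim_ definition above) =====
theorem find_post_order_spec : Claim_equal_find_post_order := by
  intro xs _
  exact find_post_order_eq_alt xs
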